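-- pv_equiv track=rewrite | github.com/drizztSun/common_project | PythonLeetcode/leetcodeM/395_LongestSubstringwithAtLeastKRepeatingCharacters.py | doit_sliding_window
-- ===== SOURCE A (Python) =====
-- def doit_sliding_window(s: str, k: int) -> int:
--     from collections import defaultdict
--     maxCnt = len(set(s))
--     res = 0
--
--     for uniqueCnt in range(1, maxCnt + 1):
--
--         cnt = defaultdict(int)
--         cntK, unique, i, j = 0, 0, 0, 0
--
--         while j < len(s):
--
--             if unique <= uniqueCnt:
--                 cnt[s[j]] += 1
--                 if cnt[s[j]] == 1:
--                     unique += 1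
--                 if cnt[s[j]] == k:
--                     cntK += 1
--                 j += 1
--             else:
--                 cnt[s[i]] -= 1
--
--                 if cnt[s[i]] == k - 1:
--                     cntK -= 1
--
--                 if cnt[s[i]] == 0:
--                     unique -= 1
--                     del cnt[s[i]]
--
--                 i += 1
--
--             if unique == uniqueCnt and cntK == len(cnt):
--                 res = max(res, j - i)
--
--     return res
-- ===== SOURCE B (Python) =====
-- def doit_sliding_window(s: str, k: int) -> int:
--     if k <= 0:
--         return 0
--     best = 0
--     n = len(s)
--     for i in range(n):
--         cnt = {}
--         bad = 0          # number of seen characters whose count is still < k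
--         m = 0
--         for ch in s[i:]:
--             old = cnt.get(ch, 0)
--             cnt[ch] = old + 1
--             if old == 0:
--                 if k > 1:
--                     bad += 1
--             elif old + 1 == k:
--                 bad -= 1
--             m += 1
--             if bad == 0:
--                 best = max(best, m)
--     return best
-- ===== Notes on version B (the rewrite author's own statement) =====
-- stated objective: simpler
-- what changed: Replaced the multi-pass two-pointer sliding window (one shrink/expand scan per candidate distinct-character count, with unique/cntK bookkeeping and dict deletions) by a plain exhaustive scan: for every start position grow a counter over the suffix, maintain the number of characters still below k, and record the window length whenever it is zero (same k<=0 -> 0 degenerate-case result as A).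
import Mathlib
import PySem

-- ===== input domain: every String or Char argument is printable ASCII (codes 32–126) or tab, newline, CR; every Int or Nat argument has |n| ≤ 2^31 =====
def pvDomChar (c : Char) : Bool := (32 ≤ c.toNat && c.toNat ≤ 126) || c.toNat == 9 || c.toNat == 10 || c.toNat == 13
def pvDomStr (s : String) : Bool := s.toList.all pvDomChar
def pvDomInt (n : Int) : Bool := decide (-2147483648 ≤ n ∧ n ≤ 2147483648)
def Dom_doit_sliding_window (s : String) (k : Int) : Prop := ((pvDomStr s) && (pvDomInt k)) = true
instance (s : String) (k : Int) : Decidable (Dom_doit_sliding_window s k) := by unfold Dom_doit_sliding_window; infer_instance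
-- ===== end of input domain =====

-- B replaces A's multi-pass two-pointer sliding window by a plain exhaustive scan over all
-- start positions with an incremental counter (simpler, not faster); same value on every input.


-- ===== PORT A =====
-- the inner `while j < len(s)` loop of A; fuel 2*len(s)+1 bounds the iteration count
-- (each iteration increments i or j, both of which stay ≤ len(s)); i, j are the two
-- window pointers (always ≥ 0 in Python, so Nat), cnt the defaultdict(int).
-- s[j] / s[i] are ported as l.getD _ ' ' : the loop only reads indices < len(s) (exact there).
def aLoop (l : List Char) (k uniqueCnt : Int) :
    Nat → PySem.Dict Char Int → Int → Int → Nat → Nat → Int → Int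
  | 0, _, _, _, _, _, res => res
  | fuel+1, cnt, cntK, unique, i, j, res =>
    if j < l.length then
      if unique ≤ uniqueCnt then
        let c := l.getD j ' '
        let cnt' := cnt.modify c 0 (· + 1)
        let unique' := if cnt'.getD c 0 == 1 then unique + 1 else unique
        let cntK' := if cnt'.getD c 0 == k then cntK + 1 else cntK
        let j' := j + 1
        let res' := if unique' == uniqueCnt && cntK' == (cnt'.size : Int) then
            max res ((j' : Int) - (i : Int)) else res
        aLoop l k uniqueCnt fuel cnt' cntK' unique' i j' res'
      else
        let c := l.getD i ' '
        let cnt1 := cnt.modify c 0 (· - 1)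
        let cntK' := if cnt1.getD c 0 == k - 1 then cntK - 1 else cntK
        let unique' := if cnt1.getD c 0 == 0 then unique - 1 else unique
        let cnt' := if cnt1.getD c 0 == 0 then cnt1.erase c else cnt1
        let i' := i + 1
        let res' := if unique' == uniqueCnt && cntK' == (cnt'.size : Int) then
            max res ((j : Int) - (i' : Int)) else res
        aLoop l k uniqueCnt fuel cnt' cntK' unique' i' j res'
    else res

def doit_sliding_window (s : String) (k : Int) : Int :=
  let l := s.toList
  let maxCnt := (PySem.Set.ofList l).length          -- len(set(s))
  (PySem.List.pyRange 1 ((maxCnt : Int) + 1) 1).foldl  -- for uniqueCnt in range(1, maxCnt+1)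
    (fun res u => aLoop l k u (2 * l.length + 1) PySem.Dict.empty 0 0 0 0 res) 0

-- ===== PORT B =====
-- B: for every start index i, grow a counter over the suffix s[i:], maintaining `bad`,
-- the number of seen characters whose count is still < k, and recording the running
-- window length whenever bad == 0; k ≤ 0 returns 0 like A.
def bStep (k : Int) (st : PySem.Dict Char Int × Int × Int × Int) (ch : Char) :
    PySem.Dict Char Int × Int × Int × Int :=
  let old := st.1.getD ch 0                          -- old = cnt.get(ch, 0)
  let cnt := st.1.insert ch (old + 1)                -- cnt[ch] = old + 1
  let bad := if old == 0 then (if 1 < k then st.2.1 + 1 else st.2.1)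
             else (if old + 1 == k then st.2.1 - 1 else st.2.1)
  let m := st.2.2.1 + 1                              -- m += 1
  let best := if bad == 0 then max st.2.2.2 m else st.2.2.2
  (cnt, bad, m, best)

def doit_sliding_window_alt (s : String) (k : Int) : Int :=
  if k ≤ 0 then 0
  else
    let l := s.toList
    (List.range l.length).foldl (fun best (i : Nat) =>      -- for i in range(len(s)) (i ≥ 0: Nat)
      ((PySem.List.slice l (some (i : Int)) none).foldl (bStep k)  -- for ch in s[i:]
        (PySem.Dict.empty, 0, 0, best)).2.2.2) 0

-- ===== PRECONDITION & SPEC =====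
def Spec_doit_sliding_window (s : String) (k : Int) (out : Int) : Prop := out = doit_sliding_window_alt s k
instance (s : String) (k : Int) (out : Int) : Decidable (Spec_doit_sliding_window s k out) := by unfold Spec_doit_sliding_window; infer_instance

-- ===== CLAIM (what is proved, stated in full; the proofs are below) =====
def Claim_equal_doit_sliding_window : Prop := ∀ (s : String) (k : Int), Dom_doit_sliding_window s k → Spec_doit_sliding_window s k (doit_sliding_window s k)

-- ===== LEMMAS AND PROOFS =====

-- The window s[i:j] as a list, and the notions both programs are secretly about.
def win (l : List Char) (i j : Nat) : List Char := (l.drop i).take (j - i)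
def validK (k : Int) (w : List Char) : Prop := ∀ c ∈ w, k ≤ (w.count c : Int)
def dc (w : List Char) : Nat := w.toFinset.card
def kcnt (k : Int) (w : List Char) : Nat :=
  (w.toFinset.filter (fun c => k ≤ (w.count c : Int))).card

-- the loop invariant tying A's state to the window
def AInv (l : List Char) (k : Int) (cnt : PySem.Dict Char Int) (cntK unique : Int)
    (i j : Nat) : Prop :=
  i ≤ j ∧ j ≤ l.length ∧
  (∀ c, cnt.getD c 0 = ((win l i j).count c : Int)) ∧
  cnt.keys.Nodup ∧
  (∀ c, cnt.contains c = true ↔ c ∈ win l i j) ∧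
  unique = (dc (win l i j) : Int) ∧
  (1 ≤ k → cntK = (kcnt k (win l i j) : Int)) ∧
  (k < 1 → cntK = 0)

-- ---- window lemmas ----
theorem win_self (l : List Char) (i : Nat) : win l i i = [] := by
  simp [win]

theorem win_snoc (l : List Char) (i j : Nat) (hij : i ≤ j) (hj : j < l.length) :
    win l i (j+1) = win l i j ++ [l.getD j ' '] := by
  have h1 : j + 1 - i = (j - i) + 1 := by omega
  have h2 : (l.drop i)[j - i]? = some (l.getD j ' ') := by
    rw [List.getElem?_drop]
    have h3 : i + (j - i) = j := by omega
    rw [h3, List.getElem?_eq_getElem hj, List.getD_eq_getElem l ' ' hj]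
  simp [win, h1, List.take_succ, h2]

theorem win_cons (l : List Char) (i j : Nat) (hij : i < j) (hj : j ≤ l.length) :
    win l i j = l.getD i ' ' :: win l (i+1) j := by
  have hi : i < l.length := by omega
  have h1 : l.drop i = l[i] :: l.drop (i+1) := List.drop_eq_getElem_cons hi
  have h2 : j - i = (j - (i+1)) + 1 := by omega
  rw [win, win, h1, h2, List.take_succ_cons, List.getD_eq_getElem l ' ' hi]

theorem win_append (l : List Char) (i a b : Nat) (h1 : i ≤ a) (h2 : a ≤ b)
    (h3 : b ≤ l.length) : win l i a ++ win l a b = win l i b := by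
  have h4 : l.drop a = (l.drop i).drop (a - i) := by
    rw [List.drop_drop]; congr 1; omega
  have h5 : b - i = (a - i) + (b - a) := by omega
  rw [win, win, win, h4, h5, List.take_add]

theorem win_sublist (l : List Char) (i j : Nat) : List.Sublist (win l i j) l := by
  exact ((l.drop i).take_sublist _).trans (l.drop_sublist i)

theorem length_win (l : List Char) (i j : Nat) (hij : i ≤ j) (hj : j ≤ l.length) :
    (win l i j).length = j - i := by
  simp [win]; omega

theorem win_full (l : List Char) : win l 0 l.length = l := by
  simp [win]

theorem win_of_prefix_drop (l : List Char) (a : Nat) (q : List Char)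
    (h : q <+: l.drop a) : win l a (a + q.length) = q := by
  have h1 : a + q.length - a = q.length := by omega
  rw [win, h1, ← List.prefix_iff_eq_take.mp h]

theorem drop_eq_win_append (l : List Char) (a b : Nat) (hab : a ≤ b) :
    l.drop a = win l a b ++ l.drop b := by
  have h1 : l.drop b = (l.drop a).drop (b - a) := by
    rw [List.drop_drop]; congr 1; omega
  rw [win, h1, List.take_append_drop]

-- ---- distinct-count and k-count lemmas ----
theorem dc_cons (x : Char) (w : List Char) :
    dc (x :: w) = (if x ∈ w then 0 else 1) + dc w := by
  by_cases hx : x ∈ w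
  · simp [dc, List.toFinset_cons, Finset.insert_eq_self.mpr (List.mem_toFinset.mpr hx), hx]
  · simp only [dc, List.toFinset_cons, hx, if_neg, not_false_iff]
    rw [Finset.card_insert_of_notMem (by simpa using hx)]
    omega

theorem dc_perm {w w' : List Char} (h : w.Perm w') : dc w = dc w' := by
  simp [dc, (List.toFinset_eq_of_perm _ _ h)]

theorem kcnt_perm {w w' : List Char} (k : Int) (h : w.Perm w') : kcnt k w = kcnt k w' := by
  unfold kcnt
  rw [(List.toFinset_eq_of_perm _ _ h)]
  congr 1
  apply Finset.filter_congr
  intro c _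
  simp [h.count_eq]

theorem kcnt_cons (k : Int) (x : Char) (w : List Char) (hk : 1 ≤ k) :
    (kcnt k (x :: w) : Int) = kcnt k w + (if (w.count x : Int) + 1 = k then 1 else 0) := by
  have hcount : ∀ c : Char, c ≠ x → (x::w).count c = w.count c := by
    intro c hc
    simp [List.count_cons, Ne.symm hc]
  have hself : (x::w).count x = w.count x + 1 := by simp [List.count_cons]
  unfold kcnt
  by_cases hx : x ∈ w
  · rw [List.toFinset_cons, Finset.insert_eq_self.mpr (List.mem_toFinset.mpr hx)]
    by_cases hc : (w.count x : Int) + 1 = k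
    · have hpx : k ≤ ((x::w).count x : Int) := by rw [hself]; push_cast; omega
      have hnpx : ¬ (k ≤ (w.count x : Int)) := by omega
      have heq : w.toFinset.filter (fun c => k ≤ ((x::w).count c : Int)) =
          insert x (w.toFinset.filter (fun c => k ≤ (w.count c : Int))) := by
        ext c
        by_cases hcx : c = x
        · subst hcx
          simp [List.mem_toFinset.mpr hx]
          omega
        · simp only [Finset.mem_filter, Finset.mem_insert, hcx, false_or]
          rw [hcount c hcx]
      rw [heq, Finset.card_insert_of_notMem (by simp [hnpx])]
      simp [hc]
    · have heq : w.toFinset.filter (fun c => k ≤ ((x::w).count c : Int)) =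
          w.toFinset.filter (fun c => k ≤ (w.count c : Int)) := by
        apply Finset.filter_congr
        intro c _
        by_cases hcx : c = x
        · subst hcx; rw [hself]; push_cast
          constructor <;> (intro; omega)
        · rw [hcount c hcx]
      rw [heq]; simp [hc]
  · rw [List.toFinset_cons, Finset.filter_insert]
    have hfil : w.toFinset.filter (fun c => k ≤ ((x::w).count c : Int)) =
        w.toFinset.filter (fun c => k ≤ (w.count c : Int)) := by
      apply Finset.filter_congr
      intro c hcF
      have hcx : c ≠ x := fun h => hx (h ▸ List.mem_toFinset.mp hcF)
      rw [hcount c hcx]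
    have hcnt0 : w.count x = 0 := List.count_eq_zero.mpr hx
    by_cases hc : (w.count x : Int) + 1 = k
    · have hpx : k ≤ ((x::w).count x : Int) := by rw [hself, hcnt0]; push_cast; omega
      rw [if_pos hpx, hfil, Finset.card_insert_of_notMem (by simp [hx])]
      simp [hc]
    · have hpx : ¬ (k ≤ ((x::w).count x : Int)) := by rw [hself, hcnt0]; push_cast; omega
      rw [if_neg hpx, hfil]; simp [hc]

theorem dc_pos (w : List Char) (h : w ≠ []) : 1 ≤ dc w := by
  have hne : w.toFinset.Nonempty := by
    cases w with
    | nil => exact absurd rfl h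
    | cons x t => exact ⟨x, by simp⟩
  exact Finset.card_pos.mpr hne

theorem valid_of_kcnt_eq_dc (k : Int) (w : List Char) (h : kcnt k w = dc w) :
    validK k w := by
  intro c hc
  exact Finset.filter_card_eq h c (List.mem_toFinset.mpr hc)

theorem kcnt_eq_dc_of_valid (k : Int) (w : List Char) (h : validK k w) :
    kcnt k w = dc w := by
  unfold kcnt dc
  congr 1
  exact Finset.filter_true_of_mem (fun c hc => h c (List.mem_toFinset.mp hc))

-- ---- Dict.erase lemmas (erase = filter on items; not in the PySem lemma book) ----
theorem dict_get?_erase_self (d : PySem.Dict Char Int) (x : Char) :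
    (d.erase x).get? x = none := by
  have hfind : List.find? (fun p => p.1 == x) (d.items.filter (fun p => !(p.1 == x))) = none := by
    rw [List.find?_eq_none]
    intro p hp
    simpa using (List.mem_filter.mp hp).2
  simp [PySem.Dict.erase, PySem.Dict.get?, hfind]

theorem dict_get?_erase_ne (d : PySem.Dict Char Int) (x c : Char) (h : c ≠ x) :
    (d.erase x).get? c = d.get? c := by
  simp only [PySem.Dict.erase, PySem.Dict.get?, List.find?_filter]
  have hpred : (fun a : Char × Int => decide ((!a.1 == x) = true ∧ (a.1 == c) = true))
      = (fun p : Char × Int => p.1 == c) := by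
    funext p
    by_cases hp : p.1 = c
    · simp [hp, h]
    · simp [hp]
  rw [hpred]


theorem dict_contains_erase (d : PySem.Dict Char Int) (x c : Char) :
    (d.erase x).contains c = (!(c == x) && d.contains c) := by
  simp only [PySem.Dict.erase, PySem.Dict.contains, List.any_filter]
  by_cases hcx : c = x
  · subst hcx
    simp
  · have hbeq : (c == x) = false := by simpa using hcx
    simp only [hbeq, Bool.not_false, Bool.true_and]
    have hpred : (fun a : Char × Int => !a.1 == x && (a.1 == c))
        = (fun p : Char × Int => p.1 == c) := by
      funext p
      by_cases hp : p.1 = c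
      · simp [hp, hbeq]
      · simp [hp]
    rw [hpred]


theorem dict_keys_erase (d : PySem.Dict Char Int) (x : Char) :
    (d.erase x).keys = d.keys.filter (fun c => !(c == x)) := by
  show (d.items.filter (fun p => !(p.1 == x))).map Prod.fst
      = (d.items.map Prod.fst).filter (fun c => !(c == x))
  rw [List.filter_map]
  rfl

-- size of a Nodup dict whose keys are exactly the members of w
theorem size_eq_dc (cnt : PySem.Dict Char Int) (w : List Char)
    (hnd : cnt.keys.Nodup) (hmem : ∀ c, cnt.contains c = true ↔ c ∈ w) :
    cnt.size = dc w := by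
  have h1 : cnt.keys.toFinset = w.toFinset := by
    ext c
    simp only [List.mem_toFinset]
    rw [← PySem.Dict.contains_iff_mem_keys]
    exact hmem c
  have h2 : cnt.size = cnt.keys.length := by
    simp [PySem.Dict.size, PySem.Dict.keys]
  rw [h2, ← List.toFinset_card_of_nodup hnd, h1]
  rfl

-- ---- A-side loop lemmas ----

-- the recorded check means: the current window is valid
theorem check_imp_valid (l : List Char) (k u : Int) (hk : 1 ≤ k)
    (cnt : PySem.Dict Char Int) (cntK unique : Int) (i j : Nat)
    (hInv : AInv l k cnt cntK unique i j)
    (hchk : (unique == u && cntK == (cnt.size : Int)) = true) :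
    validK k (win l i j) := by
  obtain ⟨_, _, _, hnd, hmem, huni, hK1, _⟩ := hInv
  obtain ⟨h1, h2⟩ := Bool.and_eq_true_iff.mp hchk
  have h2' : cntK = (cnt.size : Int) := beq_iff_eq.mp h2
  have hsz : cnt.size = dc (win l i j) := size_eq_dc cnt _ hnd hmem
  have hkd : (kcnt k (win l i j) : Int) = (dc (win l i j) : Int) := by
    rw [← hK1 hk, h2', hsz]
  exact valid_of_kcnt_eq_dc k _ (by exact_mod_cast hkd)

theorem valid_imp_check (l : List Char) (k u : Int) (hk : 1 ≤ k)
    (cnt : PySem.Dict Char Int) (cntK unique : Int) (i j : Nat)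
    (hInv : AInv l k cnt cntK unique i j)
    (hvalid : validK k (win l i j)) (huq : unique = u) :
    (unique == u && cntK == (cnt.size : Int)) = true := by
  obtain ⟨_, _, _, hnd, hmem, huni, hK1, _⟩ := hInv
  have hsz : cnt.size = dc (win l i j) := size_eq_dc cnt _ hnd hmem
  rw [Bool.and_eq_true_iff]
  refine ⟨beq_iff_eq.mpr huq, beq_iff_eq.mpr ?_⟩
  rw [hK1 hk, hsz, kcnt_eq_dc_of_valid k _ hvalid]

-- the shrink branch only runs on a nonempty window
theorem window_ne (l : List Char) (k u : Int) (cnt : PySem.Dict Char Int)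
    (cntK unique : Int) (i j : Nat) (hInv : AInv l k cnt cntK unique i j)
    (hu : 1 ≤ u) (hlt : u < unique) : i < j := by
  obtain ⟨hij, hjn, _, _, _, huni, _, _⟩ := hInv
  have h2 : dc (win l i j) ≤ (win l i j).length := List.toFinset_card_le _
  have h3 : (win l i j).length = j - i := length_win l i j hij hjn
  omega

theorem aLoop_mono (l : List Char) (k u : Int) (fuel : Nat) (cnt : PySem.Dict Char Int)
    (cntK unique : Int) (i j : Nat) (res : Int) :
    res ≤ aLoop l k u fuel cnt cntK unique i j res := by
  induction fuel generalizing cnt cntK unique i j res with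
  | zero => simp [aLoop]
  | succ fuel ih =>
    have key : ∀ (P : Prop) (inst : Decidable P) (X : Int), res ≤ @ite _ P inst (max res X) res := by
      intro P inst X
      by_cases h : P
      · rw [if_pos h]; exact le_max_left _ _
      · rw [if_neg h]
    simp only [aLoop]
    by_cases hj : j < l.length
    · simp only [if_pos hj]
      by_cases hle : unique ≤ u
      · simp only [if_pos hle]
        exact le_trans (key _ _ _) (ih ..)
      · simp only [if_neg hle]
        exact le_trans (key _ _ _) (ih ..)
    · simp only [if_neg hj]
      exact le_refl res


-- one expand step preserves the invariant
theorem inv_expand (l : List Char) (k : Int) (cnt : PySem.Dict Char Int)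
    (cntK unique : Int) (i j : Nat) (hInv : AInv l k cnt cntK unique i j)
    (hj : j < l.length) :
    AInv l k (cnt.modify (l.getD j ' ') 0 (· + 1))
      (if (cnt.modify (l.getD j ' ') 0 (· + 1)).getD (l.getD j ' ') 0 == k then cntK + 1 else cntK)
      (if (cnt.modify (l.getD j ' ') 0 (· + 1)).getD (l.getD j ' ') 0 == 1 then unique + 1 else unique)
      i (j + 1) := by
  obtain ⟨hij, hjn, hcnt, hnd, hmem, huni, hK1, hK0⟩ := hInv
  set x := l.getD j ' ' with hx
  have hw' : win l i (j+1) = win l i j ++ [x] := win_snoc l i j hij hj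
  have hperm : (win l i j ++ [x]).Perm (x :: win l i j) := List.perm_append_comm
  have hcx : (cnt.modify x 0 (· + 1)).getD x 0 = ((win l i j).count x : Int) + 1 := by
    rw [PySem.Dict.getD_modify, if_pos rfl, hcnt x]
  have hcountx : (win l i (j+1)).count x = (win l i j).count x + 1 := by
    rw [hw']; simp
  refine ⟨by omega, by omega, ?_, ?_, ?_, ?_, ?_, ?_⟩
  · intro c
    rw [PySem.Dict.getD_modify]
    by_cases hc : c = x
    · rw [hc, if_pos rfl, hcnt x, hcountx]; push_cast; ring
    · rw [if_neg hc, hcnt c, hw']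
      have hbx : (x == c) = false := by simpa using fun h : x = c => hc h.symm
      have : (win l i j ++ [x]).count c = (win l i j).count c := by
        simp [List.count_append, List.count_cons, hbx]
      rw [this]
  · rw [PySem.Dict.keys_modify]
    exact PySem.Dict.nodup_keys_insert _ _ _ hnd
  · intro c
    rw [PySem.Dict.contains_modify, hw']
    by_cases hc : c = x
    · subst hc; simp
    · have hb : (c == x) = false := by simpa using hc
      rw [hb]
      simp only [Bool.false_or, hmem c, List.mem_append, List.mem_singleton, hc, or_false]
  · rw [hcx]
    have hdc : dc (win l i (j+1)) = (if x ∈ win l i j then 0 else 1) + dc (win l i j) := by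
      rw [hw', dc_perm hperm, dc_cons]
    by_cases hmx : x ∈ win l i j
    · have hcp : 0 < (win l i j).count x := List.count_pos_iff.mpr hmx
      have hne : (((win l i j).count x : Int) + 1 == 1) = false :=
        beq_false_of_ne (by omega)
      rw [hne, huni, hdc, if_pos hmx]
      simp
    · have hc0 : (win l i j).count x = 0 := List.count_eq_zero.mpr hmx
      have heq : (((win l i j).count x : Int) + 1 == 1) = true := by
        rw [hc0]; simp
      rw [heq, huni, hdc, if_neg hmx]
      simp only [if_true]
      push_cast; ring
  · intro hk
    rw [hcx]
    have hkc : (kcnt k (win l i (j+1)) : Int) =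
        kcnt k (win l i j) + (if ((win l i j).count x : Int) + 1 = k then 1 else 0) := by
      rw [hw', kcnt_perm k hperm, kcnt_cons k x _ hk]
    rw [hkc, ← hK1 hk]
    by_cases hc : ((win l i j).count x : Int) + 1 = k
    · rw [if_pos hc]
      have : (((win l i j).count x : Int) + 1 == k) = true := beq_iff_eq.mpr hc
      rw [this]
      simp
    · rw [if_neg hc]
      have : (((win l i j).count x : Int) + 1 == k) = false := beq_false_of_ne hc
      rw [this]
      simp
  · intro hk
    rw [hcx]
    have : (((win l i j).count x : Int) + 1 == k) = false := by
      apply beq_false_of_ne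
      have : (0 : Int) ≤ ((win l i j).count x : Int) := by positivity
      omega
    rw [this]
    simp
    exact hK0 hk

-- one shrink step preserves the invariant (it needs a nonempty window)
theorem inv_shrink (l : List Char) (k : Int) (cnt : PySem.Dict Char Int)
    (cntK unique : Int) (i j : Nat) (hInv : AInv l k cnt cntK unique i j)
    (hne : i < j) :
    AInv l k
      (if (cnt.modify (l.getD i ' ') 0 (· - 1)).getD (l.getD i ' ') 0 == 0
        then (cnt.modify (l.getD i ' ') 0 (· - 1)).erase (l.getD i ' ')
        else cnt.modify (l.getD i ' ') 0 (· - 1))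
      (if (cnt.modify (l.getD i ' ') 0 (· - 1)).getD (l.getD i ' ') 0 == k - 1 then cntK - 1 else cntK)
      (if (cnt.modify (l.getD i ' ') 0 (· - 1)).getD (l.getD i ' ') 0 == 0 then unique - 1 else unique)
      (i + 1) j := by
  obtain ⟨hij, hjn, hcnt, hnd, hmem, huni, hK1, hK0⟩ := hInv
  set x := l.getD i ' ' with hx
  have hw : win l i j = x :: win l (i+1) j := win_cons l i j hne hjn
  set w2 := win l (i+1) j with hw2
  have hcountx : (win l i j).count x = w2.count x + 1 := by rw [hw]; simp
  have hc1x : (cnt.modify x 0 (· - 1)).getD x 0 = (w2.count x : Int) := by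
    rw [PySem.Dict.getD_modify, if_pos rfl, hcnt x, hcountx]; push_cast; ring
  have hc1 : ∀ c, c ≠ x → (cnt.modify x 0 (· - 1)).getD c 0 = (w2.count c : Int) := by
    intro c hc
    rw [PySem.Dict.getD_modify, if_neg hc, hcnt c, hw]
    simp [List.count_cons, Ne.symm hc]
  have hdc : dc (win l i j) = (if x ∈ w2 then 0 else 1) + dc w2 := by
    rw [hw, dc_cons]
  have hkcnt : 1 ≤ k → (kcnt k (win l i j) : Int) =
      kcnt k w2 + (if (w2.count x : Int) + 1 = k then 1 else 0) := by
    intro hk; rw [hw, kcnt_cons k x _ hk]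
  by_cases hmx : x ∈ w2
  · -- count stays positive: no erase, unique unchanged
    have hcp : 0 < w2.count x := List.count_pos_iff.mpr hmx
    have hne0 : ((w2.count x : Int) == 0) = false := by
      apply beq_false_of_ne; omega
    rw [hc1x, hne0]
    simp only [Bool.false_eq_true, if_false]
    refine ⟨by omega, by omega, ?_, ?_, ?_, ?_, ?_, ?_⟩
    · intro c
      by_cases hc : c = x
      · subst hc; exact hc1x
      · exact hc1 c hc
    · rw [PySem.Dict.keys_modify]
      exact PySem.Dict.nodup_keys_insert _ _ _ hnd
    · intro c
      rw [PySem.Dict.contains_modify]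
      by_cases hc : c = x
      · subst hc; rw [← hw2]; simp [hmx]
      · have hb : (c == x) = false := by simpa using hc
        rw [hb]
        simp only [Bool.false_or, hmem c, hw]
        simp [List.mem_cons, hc, ← hw2]
    · rw [huni, hdc, if_pos hmx, ← hw2]; simp
    · intro hk
      rw [hK1 hk, hkcnt hk]
      by_cases hc : (w2.count x : Int) + 1 = k
      · have : ((w2.count x : Int) == k - 1) = true := beq_iff_eq.mpr (by omega)
        rw [this, if_pos hc, ← hw2]; simp
      · have : ((w2.count x : Int) == k - 1) = false := beq_false_of_ne (by omega)
        rw [this, if_neg hc, ← hw2]; simp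
    · intro hk
      have : ((w2.count x : Int) == k - 1) = false := by
        apply beq_false_of_ne
        have : (0 : Int) ≤ (w2.count x : Int) := by positivity
        omega
      rw [this]
      simp
      exact hK0 hk
  · -- count drops to zero: erase, unique decreases
    have hc0 : w2.count x = 0 := List.count_eq_zero.mpr hmx
    have heq0 : ((w2.count x : Int) == 0) = true := by rw [hc0]; simp
    rw [hc1x, heq0]
    simp only [if_true]
    refine ⟨by omega, by omega, ?_, ?_, ?_, ?_, ?_, ?_⟩
    · intro c
      by_cases hc : c = x
      · subst hc
        rw [PySem.Dict.getD_eq_get?_getD, dict_get?_erase_self, hc0]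
        rfl
      · rw [PySem.Dict.getD_eq_get?_getD, dict_get?_erase_ne _ _ _ hc,
          ← PySem.Dict.getD_eq_get?_getD]
        exact hc1 c hc
    · rw [dict_keys_erase]
      apply List.Nodup.filter
      rw [PySem.Dict.keys_modify]
      exact PySem.Dict.nodup_keys_insert _ _ _ hnd
    · intro c
      rw [dict_contains_erase]
      by_cases hc : c = x
      · subst hc; rw [← hw2]; simp [hmx]
      · have hb : (c == x) = false := by simpa using hc
        rw [hb]
        simp only [Bool.not_false, Bool.true_and]
        rw [PySem.Dict.contains_modify]
        have hb2 : (c == x) = false := hb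
        rw [hb2]
        simp only [Bool.false_or, hmem c, hw]
        simp [List.mem_cons, hc, ← hw2]
    · rw [huni, hdc, if_neg hmx, ← hw2]
      push_cast; ring
    · intro hk
      rw [hK1 hk, hkcnt hk]
      by_cases hc : (w2.count x : Int) + 1 = k
      · have : ((w2.count x : Int) == k - 1) = true := beq_iff_eq.mpr (by omega)
        rw [this, if_pos hc, ← hw2]; simp
      · have : ((w2.count x : Int) == k - 1) = false := beq_false_of_ne (by omega)
        rw [this, if_neg hc, ← hw2]; simp
    · intro hk
      have : ((w2.count x : Int) == k - 1) = false := by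
        apply beq_false_of_ne
        have : (0 : Int) ≤ (w2.count x : Int) := by positivity
        omega
      rw [this]
      simp
      exact hK0 hk

-- soundness: the loop's result is the initial res or the length of a valid window
theorem aLoop_sound (l : List Char) (k u : Int) (hk : 1 ≤ k) (hu : 1 ≤ u) :
    ∀ (fuel : Nat) (cnt : PySem.Dict Char Int) (cntK unique : Int) (i j : Nat) (res : Int),
    AInv l k cnt cntK unique i j →
    aLoop l k u fuel cnt cntK unique i j res = res ∨
      ∃ a b : Nat, a ≤ b ∧ b ≤ l.length ∧ validK k (win l a b) ∧
        aLoop l k u fuel cnt cntK unique i j res = (b : Int) - (a : Int) := by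
  intro fuel
  induction fuel with
  | zero =>
    intro cnt cntK unique i j res hInv
    left; simp [aLoop]
  | succ fuel ih =>
    intro cnt cntK unique i j res hInv
    simp only [aLoop]
    by_cases hj : j < l.length
    · simp only [if_pos hj]
      by_cases hle : unique ≤ u
      · simp only [if_pos hle]
        have hij : i ≤ j := hInv.1
        have hInv' := inv_expand l k cnt cntK unique i j hInv hj
        generalize hC : cnt.modify (l.getD j ' ') 0 (· + 1) = C at hInv' ⊢
        generalize hU : (if C.getD (l.getD j ' ') 0 == 1 then unique + 1 else unique) = U at hInv' ⊢
        generalize hK : (if C.getD (l.getD j ' ') 0 == k then cntK + 1 else cntK) = K at hInv' ⊢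
        by_cases hchk : (U == u && K == (C.size : Int)) = true
        · rw [if_pos hchk]
          have hval' := check_imp_valid l k u hk C K U i (j+1) hInv' hchk
          rcases ih C K U i (j+1) (max res ((j + 1 : Nat) - (i : Int))) hInv' with hres | hval
          · rcases le_total ((j + 1 : Nat) - (i : Int)) res with hmx | hmx
            · left; rw [hres, max_eq_left hmx]
            · right
              exact ⟨i, j+1, by omega, by omega, hval',
                by rw [hres, max_eq_right hmx]⟩
          · right; exact hval
        · rw [if_neg hchk]
          exact ih C K U i (j+1) res hInv'
      · simp only [if_neg hle]
        have hwin : i < j := window_ne l k u cnt cntK unique i j hInv hu (by omega)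
        have hjn : j ≤ l.length := hInv.2.1
        have hInv' := inv_shrink l k cnt cntK unique i j hInv hwin
        generalize hC1 : cnt.modify (l.getD i ' ') 0 (· - 1) = C1 at hInv' ⊢
        generalize hC : (if C1.getD (l.getD i ' ') 0 == 0 then C1.erase (l.getD i ' ') else C1) = C at hInv' ⊢
        generalize hU : (if C1.getD (l.getD i ' ') 0 == 0 then unique - 1 else unique) = U at hInv' ⊢
        generalize hK : (if C1.getD (l.getD i ' ') 0 == k - 1 then cntK - 1 else cntK) = K at hInv' ⊢
        by_cases hchk : (U == u && K == (C.size : Int)) = true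
        · rw [if_pos hchk]
          have hval' := check_imp_valid l k u hk C K U (i+1) j hInv' hchk
          rcases ih C K U (i+1) j (max res ((j : Nat) - ((i+1 : Nat) : Int))) hInv' with hres | hval
          · rcases le_total ((j : Nat) - ((i+1 : Nat) : Int)) res with hmx | hmx
            · left; rw [hres, max_eq_left hmx]
            · right
              exact ⟨i+1, j, by omega, by omega, hval',
                by rw [hres, max_eq_right hmx]⟩
          · right; exact hval
        · rw [if_neg hchk]
          exact ih C K U (i+1) j res hInv'
    · simp only [if_neg hj]
      exact Or.inl trivial

-- k ≤ 0: the check never fires, the loop returns res unchanged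
theorem aLoop_zero (l : List Char) (k u : Int) (hk : k < 1) (hu : 1 ≤ u) :
    ∀ (fuel : Nat) (cnt : PySem.Dict Char Int) (cntK unique : Int) (i j : Nat) (res : Int),
    AInv l k cnt cntK unique i j →
    aLoop l k u fuel cnt cntK unique i j res = res := by
  intro fuel
  induction fuel with
  | zero =>
    intro cnt cntK unique i j res hInv
    simp [aLoop]
  | succ fuel ih =>
    intro cnt cntK unique i j res hInv
    simp only [aLoop]
    by_cases hj : j < l.length
    · simp only [if_pos hj]
      by_cases hle : unique ≤ u
      · simp only [if_pos hle]
        have hInv' := inv_expand l k cnt cntK unique i j hInv hj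
        generalize hC : cnt.modify (l.getD j ' ') 0 (· + 1) = C at hInv' ⊢
        generalize hU : (if C.getD (l.getD j ' ') 0 == 1 then unique + 1 else unique) = U at hInv' ⊢
        generalize hK : (if C.getD (l.getD j ' ') 0 == k then cntK + 1 else cntK) = K at hInv' ⊢
        have hchk : ¬ (U == u && K == (C.size : Int)) = true := by
          intro h
          obtain ⟨h1, h2⟩ := Bool.and_eq_true_iff.mp h
          have h1' : U = u := beq_iff_eq.mp h1
          have h2' : K = (C.size : Int) := beq_iff_eq.mp h2
          obtain ⟨_, _, _, hnd, hmem, huni, _, hK0⟩ := hInv'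
          have hsz : C.size = dc (win l i (j+1)) := size_eq_dc C _ hnd hmem
          rw [hK0 hk] at h2'
          omega
        rw [if_neg hchk]
        exact ih C K U i (j+1) res hInv'
      · simp only [if_neg hle]
        have hwin : i < j := window_ne l k u cnt cntK unique i j hInv hu (by omega)
        have hInv' := inv_shrink l k cnt cntK unique i j hInv hwin
        generalize hC1 : cnt.modify (l.getD i ' ') 0 (· - 1) = C1 at hInv' ⊢
        generalize hC : (if C1.getD (l.getD i ' ') 0 == 0 then C1.erase (l.getD i ' ') else C1) = C at hInv' ⊢
        generalize hU : (if C1.getD (l.getD i ' ') 0 == 0 then unique - 1 else unique) = U at hInv' ⊢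
        generalize hK : (if C1.getD (l.getD i ' ') 0 == k - 1 then cntK - 1 else cntK) = K at hInv' ⊢
        have hchk : ¬ (U == u && K == (C.size : Int)) = true := by
          intro h
          obtain ⟨h1, h2⟩ := Bool.and_eq_true_iff.mp h
          have h1' : U = u := beq_iff_eq.mp h1
          have h2' : K = (C.size : Int) := beq_iff_eq.mp h2
          obtain ⟨_, _, _, hnd, hmem, huni, _, hK0⟩ := hInv'
          have hsz : C.size = dc (win l (i+1) j) := size_eq_dc C _ hnd hmem
          rw [hK0 hk] at h2'
          omega
        rw [if_neg hchk]
        exact ih C K U (i+1) j res hInv'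
    · simp only [if_neg hj]

-- completeness: pass u of the loop reaches at least b - a for a valid window [a, b)
-- with exactly u distinct characters (side condition: k ≥ 2, or [a,b) = the whole string)
theorem aLoop_complete (l : List Char) (k u : Int) (hk : 1 ≤ k) (a b : Nat)
    (hab : a < b) (hbn : b ≤ l.length) (hval : validK k (win l a b))
    (hu : u = (dc (win l a b) : Int))
    (hside : (∀ c ∈ win l a b, 2 ≤ (win l a b).count c) ∨ (a = 0 ∧ b = l.length)) :
    ∀ (fuel : Nat) (cnt : PySem.Dict Char Int) (cntK unique : Int) (i j : Nat) (res : Int),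
    AInv l k cnt cntK unique i j → i ≤ a → j < b → 2 * l.length - i - j < fuel →
    (b : Int) - (a : Int) ≤ aLoop l k u fuel cnt cntK unique i j res := by
  have hu1 : 1 ≤ u := by
    rw [hu]
    have h1 : win l a b ≠ [] := by
      have := length_win l a b (le_of_lt hab) hbn
      intro h; rw [h] at this; simp at this; omega
    have := dc_pos _ h1
    omega
  intro fuel
  induction fuel with
  | zero =>
    intro cnt cntK unique i j res hInv hia hjb hfuel
    omega
  | succ fuel ih =>
    intro cnt cntK unique i j res hInv hia hjb hfuel
    have hj : j < l.length := lt_of_lt_of_le hjb hbn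
    have hij : i ≤ j := hInv.1
    simp only [aLoop, if_pos hj]
    by_cases hle : unique ≤ u
    · simp only [if_pos hle]
      have huni : unique = (dc (win l i j) : Int) := hInv.2.2.2.2.2.1
      have hInv' := inv_expand l k cnt cntK unique i j hInv hj
      generalize hC : cnt.modify (l.getD j ' ') 0 (· + 1) = C at hInv' ⊢
      generalize hU : (if C.getD (l.getD j ' ') 0 == 1 then unique + 1 else unique) = U at hInv' ⊢
      generalize hK : (if C.getD (l.getD j ' ') 0 == k then cntK + 1 else cntK) = K at hInv' ⊢
      by_cases hb1 : j + 1 = b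
      · subst hb1
        have hApp : win l i (j+1) = win l i a ++ win l a (j+1) :=
          (win_append l i a (j+1) hia (by omega) (by omega)).symm
        have h1 : (win l a (j+1)).toFinset ⊆ (win l i (j+1)).toFinset := by
          rw [hApp, List.toFinset_append]
          exact Finset.subset_union_right
        have h2 : dc (win l i (j+1)) ≤ dc (win l a (j+1)) := by
          rcases hside with h2cnt | ⟨ha0, _⟩
          · have haj : a ≤ j := by omega
            have hWab : win l a (j+1) = win l a j ++ [l.getD j ' '] := win_snoc l a j haj hj
            have hWij : win l i (j+1) = win l i j ++ [l.getD j ' '] := win_snoc l i j hij hj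
            have hxmem : l.getD j ' ' ∈ win l a (j+1) := by
              rw [hWab]; exact List.mem_append_right _ (List.mem_singleton_self _)
            have hx2 : 2 ≤ (win l a (j+1)).count (l.getD j ' ') := by
              have := h2cnt _ hxmem; exact this
            have hxaj : l.getD j ' ' ∈ win l a j := by
              have hcnt : (win l a (j+1)).count (l.getD j ' ')
                  = (win l a j).count (l.getD j ' ') + 1 := by rw [hWab]; simp
              have : 0 < (win l a j).count (l.getD j ' ') := by omega
              exact List.count_pos_iff.mp this
            have hxij : l.getD j ' ' ∈ win l i j := by
              have : win l i j = win l i a ++ win l a j :=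
                (win_append l i a j hia haj (le_of_lt hj)).symm
              rw [this]; exact List.mem_append_right _ hxaj
            have : dc (win l i (j+1)) = dc (win l i j) := by
              rw [hWij, dc_perm (List.perm_append_comm), List.singleton_append, dc_cons, if_pos hxij]
              simp
            rw [this]
            have : (dc (win l i j) : Int) ≤ (dc (win l a (j+1)) : Int) := by
              rw [← huni, ← hu]
              exact hle
            exact_mod_cast this
          · have hi0 : i = 0 := by omega
            rw [hi0, ha0]
        have hcard : (win l a (j+1)).toFinset = (win l i (j+1)).toFinset :=
          Finset.eq_of_subset_of_card_le h1 h2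
        have hval' : validK k (win l i (j+1)) := by
          intro c hc
          have hcab : c ∈ win l a (j+1) := by
            rw [← List.mem_toFinset, ← hcard, List.mem_toFinset] at hc
            exact hc
          have hk1 : k ≤ ((win l a (j+1)).count c : Int) := hval c hcab
          have hk2 : (win l a (j+1)).count c ≤ (win l i (j+1)).count c := by
            rw [hApp, List.count_append]; omega
          have := (Nat.cast_le (α := Int)).mpr hk2
          omega
        have hUu : U = u := by
          have h3 : U = (dc (win l i (j+1)) : Int) := hInv'.2.2.2.2.2.1
          have h4 : dc (win l i (j+1)) = dc (win l a (j+1)) := by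
            rw [dc, dc, hcard]
          rw [h3, h4, hu]
        have hchk := valid_imp_check l k u hk C K U i (j+1) hInv' hval' hUu
        rw [if_pos hchk]
        have hstep : ((j+1 : Nat) : Int) - (a : Int) ≤ max res (((j+1 : Nat) : Int) - (i : Int)) := by
          have : ((j+1 : Nat) : Int) - (i : Int) ≥ ((j+1 : Nat) : Int) - (a : Int) := by
            push_cast; omega
          exact le_trans this (le_max_right _ _)
        exact le_trans hstep (aLoop_mono l k u fuel C K U i (j+1) _)
      · exact ih C K U i (j+1) _ hInv' hia (by omega) (by omega)
    · simp only [if_neg hle]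
      have hwin : i < j := window_ne l k u cnt cntK unique i j hInv hu1 (by omega)
      have huni : unique = (dc (win l i j) : Int) := hInv.2.2.2.2.2.1
      have hInv' := inv_shrink l k cnt cntK unique i j hInv hwin
      generalize hC1 : cnt.modify (l.getD i ' ') 0 (· - 1) = C1 at hInv' ⊢
      generalize hC : (if C1.getD (l.getD i ' ') 0 == 0 then C1.erase (l.getD i ' ') else C1) = C at hInv' ⊢
      generalize hU : (if C1.getD (l.getD i ' ') 0 == 0 then unique - 1 else unique) = U at hInv' ⊢
      generalize hK : (if C1.getD (l.getD i ' ') 0 == k - 1 then cntK - 1 else cntK) = K at hInv' ⊢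
      have hia' : i + 1 ≤ a := by
        by_contra hcon
        have hiaeq : i = a := by omega
        have hsub : (win l a j).toFinset ⊆ (win l a b).toFinset := by
          have : win l a b = win l a j ++ win l j b :=
            (win_append l a j b (by omega) (by omega) hbn).symm
          rw [this, List.toFinset_append]
          exact Finset.subset_union_left
        have hcard : dc (win l a j) ≤ dc (win l a b) := Finset.card_le_card hsub
        rw [hiaeq] at huni
        have : ((dc (win l a j)) : Int) ≤ ((dc (win l a b)) : Int) := by exact_mod_cast hcard
        omega
      have key : ∀ (P : Prop) (inst : Decidable P) (X : Int),
          (b : Int) - (a : Int) ≤ aLoop l k u fuel C K U (i+1) j (@ite _ P inst (max res X) res) := by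
        intro P inst X
        exact ih C K U (i+1) j _ hInv' hia' hjb (by omega)
      exact key _ _ _

-- ---- B-side loop lemmas ----
-- B's `bad == 0` check reads: every counted character has reached k
theorem bcheck (k : Int) (w : List Char) :
    (((dc w : Int) - (kcnt k w : Int)) == 0) = true ↔ validK k w := by
  constructor
  · intro h
    have h1 : (dc w : Int) - (kcnt k w : Int) = 0 := beq_iff_eq.mp h
    exact valid_of_kcnt_eq_dc k w (by omega)
  · intro h
    rw [kcnt_eq_dc_of_valid k w h]
    simp

-- one bStep from the state describing prefix p = the state describing prefix p ++ [c]
theorem bstate (k : Int) (hk : 1 ≤ k) (p : List Char) (c : Char) (bad best : Int)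
    (hbad : bad = (dc p : Int) - (kcnt k p : Int)) :
    bStep k (PySem.Dict.counter p, bad, (p.length : Int), best) c
      = (PySem.Dict.counter (p ++ [c]),
         ((dc (p ++ [c]) : Int) - (kcnt k (p ++ [c]) : Int)),
         ((p ++ [c]).length : Int),
         if (((dc (p ++ [c]) : Int) - (kcnt k (p ++ [c]) : Int)) == 0)
           then max best ((p.length : Int) + 1) else best) := by
  have hcnt : (PySem.Dict.counter p).insert c ((PySem.Dict.counter p).getD c 0 + 1)
      = PySem.Dict.counter (p ++ [c]) := (PySem.Dict.counter_append_singleton p c).symm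
  have hold : (PySem.Dict.counter p).getD c 0 = ((p.count c : Nat) : Int) :=
    PySem.Dict.getD_counter p c
  have hdc : dc (p ++ [c]) = (if c ∈ p then 0 else 1) + dc p := by
    rw [dc_perm (List.perm_append_comm), List.singleton_append, dc_cons]
  have hkc : (kcnt k (p ++ [c]) : Int)
      = kcnt k p + (if (p.count c : Int) + 1 = k then 1 else 0) := by
    rw [kcnt_perm k (List.perm_append_comm), List.singleton_append, kcnt_cons k c p hk]
  have hlen : ((p ++ [c]).length : Int) = (p.length : Int) + 1 := by push_cast; simp
  have hbad' : (if ((PySem.Dict.counter p).getD c 0 == 0)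
        then (if 1 < k then bad + 1 else bad)
        else (if (PySem.Dict.counter p).getD c 0 + 1 == k then bad - 1 else bad))
      = ((dc (p ++ [c]) : Int) - (kcnt k (p ++ [c]) : Int)) := by
    rw [hold, hbad, hdc, hkc]
    by_cases hmem : c ∈ p
    · have hcp : 0 < p.count c := List.count_pos_iff.mpr hmem
      have h0 : (((p.count c : Nat) : Int) == 0) = false := beq_false_of_ne (by omega)
      rw [h0, if_pos hmem]
      by_cases hck : (p.count c : Int) + 1 = k
      · have : (((p.count c : Nat) : Int) + 1 == k) = true := beq_iff_eq.mpr hck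
        rw [this, if_pos hck]
        push_cast; simp; try ring
      · have : (((p.count c : Nat) : Int) + 1 == k) = false := beq_false_of_ne hck
        rw [this, if_neg hck]
        push_cast; simp; try ring
    · have hc0 : p.count c = 0 := List.count_eq_zero.mpr hmem
      have h0 : (((p.count c : Nat) : Int) == 0) = true := by rw [hc0]; simp
      rw [h0, if_neg hmem, hc0]
      by_cases hk1 : 1 < k
      · rw [if_pos hk1, if_neg (by omega : ¬ ((0 : Nat) : Int) + 1 = k)]
        push_cast; simp; try ring
      · have hke : k = 1 := by omega
        rw [if_neg hk1, if_pos (by omega : ((0 : Nat) : Int) + 1 = k)]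
        push_cast; simp; try ring
  simp only [bStep]
  rw [hbad', hcnt, hlen]

theorem bFold_best_mono (k : Int) (t : List Char) (cnt : PySem.Dict Char Int)
    (bad m best : Int) : best ≤ (t.foldl (bStep k) (cnt, bad, m, best)).2.2.2 := by
  induction t generalizing cnt bad m best with
  | nil => simp
  | cons c t ih =>
    have key : ∀ (P : Prop) (inst : Decidable P) (X : Int),
        best ≤ @ite _ P inst (max best X) best := by
      intro P inst X
      by_cases h : P
      · rw [if_pos h]; exact le_max_left _ _
      · rw [if_neg h]
    simp only [List.foldl_cons, bStep]
    exact le_trans (key _ _ _) (ih ..)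

theorem bFold_sound (k : Int) (hk : 1 ≤ k) :
    ∀ (t p : List Char) (bad best : Int), bad = (dc p : Int) - (kcnt k p : Int) →
    (t.foldl (bStep k) (PySem.Dict.counter p, bad, (p.length : Int), best)).2.2.2 = best ∨
      ∃ q : List Char, q <+: t ∧ validK k (p ++ q) ∧
        (t.foldl (bStep k) (PySem.Dict.counter p, bad, (p.length : Int), best)).2.2.2
          = ((p.length : Int) + (q.length : Int)) := by
  intro t
  induction t with
  | nil =>
    intro p bad best _
    left; rfl
  | cons c t ih =>
    intro p bad best hbad
    simp only [List.foldl_cons]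
    rw [bstate k hk p c bad best hbad]
    by_cases hchk : (((dc (p ++ [c]) : Int) - (kcnt k (p ++ [c]) : Int)) == 0) = true
    · rw [if_pos hchk]
      rcases ih (p ++ [c]) _ (max best ((p.length : Int) + 1)) rfl with h | ⟨q, hq, hv, h⟩
      · rcases le_total ((p.length : Int) + 1) best with hmx | hmx
        · left; rw [h, max_eq_left hmx]
        · right
          refine ⟨[c], ⟨t, rfl⟩, (bcheck k (p ++ [c])).mp hchk, ?_⟩
          rw [h, max_eq_right hmx]
          simp
      · right
        refine ⟨c :: q, (List.prefix_cons_inj c).mpr hq, ?_, ?_⟩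
        · rw [← List.append_cons] at hv
          exact hv
        · rw [h]; push_cast; simp; omega
    · rw [if_neg hchk]
      rcases ih (p ++ [c]) _ best rfl with h | ⟨q, hq, hv, h⟩
      · left; exact h
      · right
        refine ⟨c :: q, (List.prefix_cons_inj c).mpr hq, ?_, ?_⟩
        · rw [← List.append_cons] at hv
          exact hv
        · rw [h]; push_cast; simp; omega

theorem bFold_complete (k : Int) (hk : 1 ≤ k) :
    ∀ (q rest p : List Char) (bad best : Int), bad = (dc p : Int) - (kcnt k p : Int) →
      validK k (p ++ q) → q ≠ [] →
    ((p.length : Int) + (q.length : Int)) ≤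
      ((q ++ rest).foldl (bStep k) (PySem.Dict.counter p, bad, (p.length : Int), best)).2.2.2 := by
  intro q
  induction q with
  | nil =>
    intro rest p bad best _ _ hne
    exact absurd rfl hne
  | cons c q' ih =>
    intro rest p bad best hbad hval _
    simp only [List.cons_append, List.foldl_cons]
    rw [bstate k hk p c bad best hbad]
    by_cases hq' : q' = []
    · subst hq'
      have hval' : validK k (p ++ [c]) := by simpa using hval
      have hchk : (((dc (p ++ [c]) : Int) - (kcnt k (p ++ [c]) : Int)) == 0) = true :=
        (bcheck k (p ++ [c])).mpr hval'
      rw [if_pos hchk]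
      refine le_trans ?_ (bFold_best_mono k _ _ _ _ _)
      refine le_trans ?_ (le_max_right _ _)
      simp
    · have hval' : validK k ((p ++ [c]) ++ q') := by
        rw [List.append_assoc, List.singleton_append]
        exact hval
      refine le_trans ?_ (ih rest (p ++ [c]) _
        (if (((dc (p ++ [c]) : Int) - (kcnt k (p ++ [c]) : Int)) == 0)
          then max best ((p.length : Int) + 1) else best) rfl hval' hq')
      push_cast
      simp
      omega

-- ---- global characterizations ----

-- generic facts about Int-valued left folds (used for both programs' outer loops)
theorem foldl_int_mono {α : Type} (f : Int → α → Int) (h : ∀ r x, r ≤ f r x) :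
    ∀ (us : List α) (res : Int), res ≤ us.foldl f res := by
  intro us
  induction us with
  | nil => intro res; exact le_refl res
  | cons u us ih => intro res; exact le_trans (h res u) (ih (f res u))

theorem foldl_int_ge {α : Type} (f : Int → α → Int) (h : ∀ r x, r ≤ f r x) (X : Int) (u : α) :
    ∀ (us : List α) (res : Int), u ∈ us → (∀ r, X ≤ f r u) → X ≤ us.foldl f res := by
  intro us
  induction us with
  | nil => intro res hmem; exact absurd hmem (List.not_mem_nil)
  | cons v us ih =>
    intro res hmem hpass
    rcases List.mem_cons.mp hmem with hv | hv
    · subst hv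
      exact le_trans (hpass res) (foldl_int_mono f h us (f res u))
    · exact ih (f res v) hv hpass

theorem foldl_int_sound {α : Type} (f : Int → α → Int) (P : Int → Prop) :
    ∀ (us : List α) (res : Int), (∀ r x, x ∈ us → f r x = r ∨ P (f r x)) →
      (us.foldl f res = res ∨ P (us.foldl f res)) := by
  intro us
  induction us with
  | nil => intro res _; left; rfl
  | cons u us ih =>
    intro res hstep
    rcases hstep res u (List.mem_cons_self) with h | h
    · rw [List.foldl_cons, h]
      exact ih res (fun r x hx => hstep r x (List.mem_cons_of_mem u hx))
    · rw [List.foldl_cons]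
      rcases ih (f res u) (fun r x hx => hstep r x (List.mem_cons_of_mem u hx)) with h2 | h2
      · right; rw [h2]; exact h
      · right; exact h2

theorem foldl_int_id {α : Type} (f : Int → α → Int) :
    ∀ (us : List α) (res : Int), (∀ r x, x ∈ us → f r x = r) → us.foldl f res = res := by
  intro us
  induction us with
  | nil => intro res _; rfl
  | cons u us ih =>
    intro res hstep
    rw [List.foldl_cons, hstep res u (List.mem_cons_self)]
    exact ih res (fun r x hx => hstep r x (List.mem_cons_of_mem u hx))

theorem slice_drop (l : List Char) (i : Nat) :
    PySem.List.slice l (some (i : Int)) none = l.drop i := by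
  rw [PySem.List.slice_from l (by positivity)]; simp

def Apass (l : List Char) (k : Int) (res u : Int) : Int :=
  aLoop l k u (2 * l.length + 1) PySem.Dict.empty 0 0 0 0 res

theorem inv_init (l : List Char) (k : Int) : AInv l k PySem.Dict.empty 0 0 0 0 := by
  refine ⟨le_refl 0, Nat.zero_le _, ?_, PySem.Dict.nodup_keys_empty, ?_, ?_, ?_, ?_⟩
  · intro c; rw [win_self]; simp [PySem.Dict.getD_empty]
  · intro c; rw [win_self]; simp [PySem.Dict.contains_empty]
  · rw [win_self]; simp [dc]
  · intro _; rw [win_self]; simp [kcnt]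
  · intro _; rfl

theorem a_eq_fold (s : String) (k : Int) :
    doit_sliding_window s k =
      (PySem.List.pyRange 1 (((PySem.Set.ofList s.toList).length : Int) + 1) 1).foldl
        (Apass s.toList k) 0 := by
  rfl


theorem maxCnt_eq_dc (l : List Char) : (PySem.Set.ofList l).length = dc l := by
  rw [dc, ← List.toFinset_card_of_nodup (PySem.Set.nodup_ofList l)]
  congr 1
  ext c
  simp [PySem.Set.mem_ofList]

theorem a_nonneg (s : String) (k : Int) : 0 ≤ doit_sliding_window s k := by
  rw [a_eq_fold]
  exact foldl_int_mono _ (fun r u => aLoop_mono _ _ _ _ _ _ _ _ _ _) _ 0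

theorem a_sound (s : String) (k : Int) (hk : 1 ≤ k) :
    doit_sliding_window s k = 0 ∨
      ∃ a b : Nat, a ≤ b ∧ b ≤ s.toList.length ∧ validK k (win s.toList a b) ∧
        doit_sliding_window s k = (b : Int) - (a : Int) := by
  rw [a_eq_fold]
  apply foldl_int_sound _ (fun res => ∃ a b : Nat, a ≤ b ∧ b ≤ s.toList.length ∧
    validK k (win s.toList a b) ∧ res = (b : Int) - (a : Int))
  intro r u hu
  have hu1 : 1 ≤ u := (PySem.List.mem_pyRange_one.mp hu).1
  exact aLoop_sound s.toList k u hk hu1 _ _ _ _ _ _ _ (inv_init s.toList k)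

theorem a_complete (s : String) (k : Int) (hk : 1 ≤ k) (a b : Nat) (hab : a ≤ b)
    (hbn : b ≤ s.toList.length) (hval : validK k (win s.toList a b)) :
    (b : Int) - (a : Int) ≤ doit_sliding_window s k := by
  rcases eq_or_lt_of_le hab with heq | hlt
  · subst heq
    have := a_nonneg s k
    omega
  · have hne : win s.toList a b ≠ [] := by
      have := length_win s.toList a b hab hbn
      intro h; rw [h] at this; simp at this; omega
    have hu1N : 1 ≤ dc (win s.toList a b) := dc_pos _ hne
    have humax : dc (win s.toList a b) ≤ dc s.toList := by
      apply Finset.card_le_card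
      intro c hc
      rw [List.mem_toFinset] at hc ⊢
      exact (win_sublist s.toList a b).subset hc
    have hmono : ∀ (r : Int) (u : Int), r ≤ Apass s.toList k r u :=
      fun r u => aLoop_mono _ _ _ _ _ _ _ _ _ _
    rcases (by omega : k = 1 ∨ 2 ≤ k) with hk1 | hk2
    · subst hk1
      have hn1 : 1 ≤ s.toList.length := by omega
      have hlne : s.toList ≠ [] := by
        intro h; rw [h] at hn1; simp at hn1
      have hvalid : validK 1 (win s.toList 0 s.toList.length) := by
        rw [win_full]
        intro c hc
        have := List.count_pos_iff.mpr hc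
        omega
      have hdl : 1 ≤ dc s.toList := dc_pos _ hlne
      have hmem : ((dc s.toList : Int)) ∈
          PySem.List.pyRange 1 (((PySem.Set.ofList s.toList).length : Int) + 1) 1 := by
        rw [PySem.List.mem_pyRange_one, maxCnt_eq_dc]
        omega
      have hpass : ∀ r : Int, ((s.toList.length : Int)) - ((0 : Nat) : Int) ≤ Apass s.toList 1 r (dc s.toList : Int) := by
        intro r
        exact aLoop_complete s.toList 1 (dc s.toList : Int) (le_refl 1) 0 s.toList.length
          (by omega) (le_refl _) hvalid (by rw [win_full]) (Or.inr ⟨rfl, rfl⟩)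
          (2 * s.toList.length + 1) _ _ _ _ _ r (inv_init s.toList 1) (Nat.zero_le 0)
          (by omega) (by omega)
      rw [a_eq_fold]
      have hA := foldl_int_ge (Apass s.toList 1) hmono _ _ _ 0 hmem hpass
      omega
    · have hcnt2 : ∀ c ∈ win s.toList a b, 2 ≤ (win s.toList a b).count c := by
        intro c hc
        have := hval c hc
        omega
      have hmem : ((dc (win s.toList a b) : Int)) ∈
          PySem.List.pyRange 1 (((PySem.Set.ofList s.toList).length : Int) + 1) 1 := by
        rw [PySem.List.mem_pyRange_one, maxCnt_eq_dc]
        omega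
      have hpass : ∀ r : Int, (b : Int) - (a : Int) ≤ Apass s.toList k r (dc (win s.toList a b) : Int) := by
        intro r
        exact aLoop_complete s.toList k _ hk a b hlt hbn hval rfl (Or.inl hcnt2)
          (2 * s.toList.length + 1) _ _ _ _ _ r (inv_init s.toList k) (Nat.zero_le a)
          (by omega) (by omega)
      rw [a_eq_fold]
      exact foldl_int_ge (Apass s.toList k) hmono _ _ _ 0 hmem hpass

theorem a_zero (s : String) (k : Int) (hk : k ≤ 0) : doit_sliding_window s k = 0 := by
  rw [a_eq_fold]
  apply foldl_int_id
  intro r u hu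
  have hu1 : 1 ≤ u := (PySem.List.mem_pyRange_one.mp hu).1
  exact aLoop_zero s.toList k u (by omega) hu1 _ _ _ _ _ _ _ (inv_init s.toList k)

theorem b_nonneg (s : String) (k : Int) : 0 ≤ doit_sliding_window_alt s k := by
  by_cases hk0 : k ≤ 0
  · simp [doit_sliding_window_alt, hk0]
  · simp only [doit_sliding_window_alt, if_neg hk0]
    exact foldl_int_mono _ (fun r i => bFold_best_mono k _ _ _ _ r) _ 0

theorem b_sound (s : String) (k : Int) (hk : 1 ≤ k) :
    doit_sliding_window_alt s k = 0 ∨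
      ∃ a b : Nat, a ≤ b ∧ b ≤ s.toList.length ∧ validK k (win s.toList a b) ∧
        doit_sliding_window_alt s k = (b : Int) - (a : Int) := by
  simp only [doit_sliding_window_alt, if_neg (by omega : ¬ k ≤ 0)]
  apply foldl_int_sound _ (fun res => ∃ a b : Nat, a ≤ b ∧ b ≤ s.toList.length ∧
    validK k (win s.toList a b) ∧ res = (b : Int) - (a : Int))
  intro r i hi
  have hin : i < s.toList.length := List.mem_range.mp hi
  rw [slice_drop]
  have h2 : (List.foldl (bStep k) (PySem.Dict.empty, (0 : Int), (0 : Int), r)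
        (s.toList.drop i)).2.2.2 = r ∨
      ∃ q : List Char, q <+: s.toList.drop i ∧ validK k ([] ++ q) ∧
        (List.foldl (bStep k) (PySem.Dict.empty, (0 : Int), (0 : Int), r)
          (s.toList.drop i)).2.2.2
          = ((([] : List Char).length : Int) + (q.length : Int)) :=
    bFold_sound k hk (s.toList.drop i) [] 0 r (by simp [dc, kcnt])
  rcases h2 with h3 | ⟨q, hq, hv, h3⟩
  · left; exact h3
  · right
    refine ⟨i, i + q.length, by omega, ?_, ?_, ?_⟩
    · have := hq.length_le
      rw [List.length_drop] at this
      omega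
    · rw [win_of_prefix_drop s.toList i q hq]
      simpa using hv
    · rw [h3]; push_cast; simp

theorem b_complete (s : String) (k : Int) (hk : 1 ≤ k) (a b : Nat) (hab : a ≤ b)
    (hbn : b ≤ s.toList.length) (hval : validK k (win s.toList a b)) :
    (b : Int) - (a : Int) ≤ doit_sliding_window_alt s k := by
  rcases eq_or_lt_of_le hab with heq | hlt
  · subst heq
    have := b_nonneg s k
    omega
  · simp only [doit_sliding_window_alt, if_neg (by omega : ¬ k ≤ 0)]
    have hmono : ∀ (r : Int) (i : Nat),
        r ≤ (List.foldl (bStep k) (PySem.Dict.empty, (0 : Int), (0 : Int), r)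
              (PySem.List.slice s.toList (some (i : Int)) none)).2.2.2 :=
      fun r i => bFold_best_mono k _ _ _ _ r
    apply foldl_int_ge _ hmono _ a _ 0 (List.mem_range.mpr (by omega))
    intro r
    rw [slice_drop, drop_eq_win_append s.toList a b (le_of_lt hlt)]
    have hne : win s.toList a b ≠ [] := by
      have := length_win s.toList a b (le_of_lt hlt) hbn
      intro h; rw [h] at this; simp at this; omega
    have h2 : ((([] : List Char).length : Int) + ((win s.toList a b).length : Int)) ≤
        (List.foldl (bStep k) (PySem.Dict.empty, (0 : Int), (0 : Int), r)
          (win s.toList a b ++ s.toList.drop b)).2.2.2 :=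
      bFold_complete k hk (win s.toList a b) (s.toList.drop b) [] 0 r (by simp [dc, kcnt])
        (by simpa using hval) hne
    have hlen : (win s.toList a b).length = b - a := length_win s.toList a b (le_of_lt hlt) hbn
    rw [hlen] at h2
    have hcast : ((b - a : Nat) : Int) = (b : Int) - (a : Int) := by omega
    simpa [hcast] using h2

-- ===== VERDICT (by name: the statement is the Claim_ definition above) =====
theorem doit_sliding_window_spec : Claim_equal_doit_sliding_window := by
  intro s k _
  unfold Spec_doit_sliding_window
  by_cases hk : k ≤ 0
  · rw [a_zero s k hk]
    simp [doit_sliding_window_alt, hk]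
  · have hk1 : 1 ≤ k := by omega
    apply le_antisymm
    · rcases a_sound s k hk1 with h | ⟨a, b, hab, hbn, hval, h⟩
      · rw [h]; exact b_nonneg s k
      · rw [h]; exact b_complete s k hk1 a b hab hbn hval
    · rcases b_sound s k hk1 with h | ⟨a, b, hab, hbn, hval, h⟩
      · rw [h]; exact a_nonneg s k
      · rw [h]; exact a_complete s k hk1 a b hab hbn hval
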